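-- pv_equiv track=rewrite | github.com/alkobtan-OR/pslp | src/validator.py | score_J
-- ===== SOURCE A (Python) =====
-- from typing import Tuple, List
--
-- def score_J(u: List[int], p: List[int], S: int) -> int:
--     """
--     J(u) counts blocking pairs:
--       For any i<j in the same stack, if p_i < p_j then (i,j) contributes 1.
--     Arrival order is the natural index i=1..N; within each stack, items are
--     stored bottom-to-top in arrival order.
--     """
--     N = len(u)
--     J = 0
--     for i in range(N - 1):
--         for j in range(i + 1, N):
--             if u[i] == u[j] and p[i] < p[j]:
--                 J += 1
--     return J
-- ===== SOURCE B (Python) =====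
-- from typing import List
--
-- def score_J(u: List[int], p: List[int], S: int) -> int:
--     # One pass in arrival order: keep, per stack, the priorities seen so far;
--     # each new item adds the number of earlier same-stack items with smaller priority.
--     seen = {}
--     J = 0
--     for s, q in zip(u, p):
--         prior = seen.get(s, [])
--         J += sum(1 for x in prior if x < q)
--         seen[s] = prior + [q]
--     return J
-- ===== Notes on version B (the rewrite author's own statement) =====
-- stated objective: faster
-- what changed: A's all-pairs double index loop is replaced by a single pass that groups priorities per stack in a dict and, for each item, counts the earlier same-stack priorities smaller than it, so items in different stacks are never compared.
import Mathlib
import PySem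

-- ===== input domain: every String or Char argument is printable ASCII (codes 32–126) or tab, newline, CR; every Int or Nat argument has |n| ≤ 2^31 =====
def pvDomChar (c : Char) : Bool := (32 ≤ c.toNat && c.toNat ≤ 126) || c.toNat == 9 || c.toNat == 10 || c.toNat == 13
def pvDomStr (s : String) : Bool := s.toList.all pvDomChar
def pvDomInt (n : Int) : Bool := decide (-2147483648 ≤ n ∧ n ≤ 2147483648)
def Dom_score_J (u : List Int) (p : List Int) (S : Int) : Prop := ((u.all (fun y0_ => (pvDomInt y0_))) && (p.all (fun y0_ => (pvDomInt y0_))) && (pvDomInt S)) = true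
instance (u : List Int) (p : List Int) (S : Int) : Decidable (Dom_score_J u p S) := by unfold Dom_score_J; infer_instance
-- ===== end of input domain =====

-- B replaces A's all-pairs double loop by a single pass that groups priorities per stack
-- in a dict and counts earlier smaller same-stack priorities (objective: faster on many-stack inputs).

-- ===== PORT A =====
-- literal port of A's double index loop
def score_J (u : List Int) (p : List Int) (S : Int) : Int :=
  let N : Int := u.length
  (PySem.List.pyRange 0 (N - 1) 1).foldl (fun J i =>
    (PySem.List.pyRange (i + 1) N 1).foldl (fun J j =>
      if PySem.List.pyGetD u i 0 = PySem.List.pyGetD u j 0 ∧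
         PySem.List.pyGetD p i 0 < PySem.List.pyGetD p j 0
      then J + 1 else J) J) 0

-- ===== PORT B =====
-- literal port of Source B: one pass over zip u p with a dict stack ↦ priorities seen so far
def score_J_alt (u : List Int) (p : List Int) (S : Int) : Int :=
  ((u.zip p).foldl
    (fun (st : PySem.Dict Int (List Int) × Int) sq =>
      let prior := st.1.getD sq.1 []
      (st.1.insert sq.1 (prior ++ [sq.2]),
       st.2 + ((prior.countP (fun x => x < sq.2) : Nat) : Int)))
    (PySem.Dict.empty, 0)).2

-- ===== PRECONDITION & SPEC =====
-- Pre_ excludes exactly the inputs on which A raises IndexError: those where some same-stack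
-- pair (i, j) has its later priority index j beyond the end of p (B's zip silently truncates there).
def Pre_score_J (u : List Int) (p : List Int) (S : Int) : Prop :=
  u.length ≤ p.length ∨
    ∀ j < u.length, p.length ≤ j → ∀ i < j, u.getD i 0 ≠ u.getD j 0
instance (u : List Int) (p : List Int) (S : Int) : Decidable (Pre_score_J u p S) := by
  unfold Pre_score_J; infer_instance

def pvWitness_score_J : List Int × List Int × Int := ([1, 2, 1, 2], [3, 1, 4, 5], 0)

def Spec_score_J (u : List Int) (p : List Int) (S : Int) (out : Int) : Prop := out = score_J_alt u p S
instance (u : List Int) (p : List Int) (S : Int) (out : Int) : Decidable (Spec_score_J u p S out) := by unfold Spec_score_J; infer_instance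

-- ===== CLAIM (what is proved, stated in full; the proofs are below) =====
def Claim_equal_score_J : Prop := ∀ (u : List Int) (p : List Int) (S : Int), Dom_score_J u p S → Pre_score_J u p S → Spec_score_J u p S (score_J u p S)

-- ===== LEMMAS AND PROOFS =====

-- reference: count of same-stack increasing pairs in a list of (stack, priority) items
def pvCnt : List (Int × Int) → Int
  | [] => 0
  | a :: t => ((t.countP (fun x => x.1 = a.1 ∧ a.2 < x.2) : Nat) : Int) + pvCnt t

-- the contribution of the rest of the pass, given the dict of already-seen priorities
def pvCross (d : PySem.Dict Int (List Int)) : List (Int × Int) → Int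
  | [] => 0
  | a :: t =>
    (((d.getD a.1 []).countP (fun x => x < a.2) : Nat) : Int) +
      pvCross (d.insert a.1 (d.getD a.1 [] ++ [a.2])) t

theorem pvCross_perm_congr (l : List (Int × Int)) :
    ∀ d₁ d₂ : PySem.Dict Int (List Int),
      (∀ k, (d₁.getD k []).Perm (d₂.getD k [])) → pvCross d₁ l = pvCross d₂ l := by
  induction l with
  | nil => intro _ _ _; rfl
  | cons a t ih =>
    intro d₁ d₂ h
    simp only [pvCross]
    rw [(h a.1).countP_eq, ih]
    intro k
    by_cases hk : k = a.1
    · subst hk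
      rw [PySem.Dict.getD_insert_self, PySem.Dict.getD_insert_self]
      exact (h a.1).append (List.Perm.refl _)
    · rw [PySem.Dict.getD_insert_of_ne _ _ _ hk, PySem.Dict.getD_insert_of_ne _ _ _ hk]
      exact h k

theorem pvCross_insert (l : List (Int × Int)) :
    ∀ (d : PySem.Dict Int (List Int)) (s q : Int),
      pvCross (d.insert s (d.getD s [] ++ [q])) l
        = pvCross d l + ((l.countP (fun x => x.1 = s ∧ q < x.2) : Nat) : Int) := by
  induction l with
  | nil => intro d s q; simp [pvCross]
  | cons a t ih =>
    intro d s q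
    by_cases hs : a.1 = s
    · simp only [pvCross, PySem.Dict.getD_insert_self, hs, PySem.Dict.getD_insert_self,
        PySem.Dict.insert_insert_self]
      have h1 : pvCross (d.insert s (d.getD s [] ++ [q] ++ [a.2])) t
          = pvCross (d.insert s (d.getD s [] ++ [a.2] ++ [q])) t := by
        apply pvCross_perm_congr
        intro k
        by_cases hk : k = s
        · subst hk
          rw [PySem.Dict.getD_insert_self, PySem.Dict.getD_insert_self]
          simp only [List.append_assoc]
          exact (List.Perm.refl _).append (List.Perm.swap _ _ _)
        · rw [PySem.Dict.getD_insert_of_ne _ _ _ hk, PySem.Dict.getD_insert_of_ne _ _ _ hk]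
      have h2 : pvCross (d.insert s (d.getD s [] ++ [a.2] ++ [q])) t
          = pvCross (d.insert s (d.getD s [] ++ [a.2])) t
            + ((t.countP (fun x => x.1 = s ∧ q < x.2) : Nat) : Int) := by
        have := ih (d.insert s (d.getD s [] ++ [a.2])) s q
        rwa [PySem.Dict.getD_insert_self, PySem.Dict.insert_insert_self] at this
      rw [h1, h2]
      simp only [List.countP_append, List.countP_cons, hs]
      push_cast
      by_cases hq : q < a.2 <;> simp [hq] <;> ring
    · simp only [pvCross, PySem.Dict.getD_insert_of_ne _ _ _ hs]
      have h1 : pvCross ((d.insert s (d.getD s [] ++ [q])).insert a.1 (d.getD a.1 [] ++ [a.2])) t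
          = pvCross ((d.insert a.1 (d.getD a.1 [] ++ [a.2])).insert s (d.getD s [] ++ [q])) t := by
        apply pvCross_perm_congr
        intro k
        rw [PySem.Dict.getD_insert_insert_comm _ _ _ (fun h => hs h.symm)]
      have h2 : pvCross ((d.insert a.1 (d.getD a.1 [] ++ [a.2])).insert s (d.getD s [] ++ [q])) t
          = pvCross (d.insert a.1 (d.getD a.1 [] ++ [a.2])) t
            + ((t.countP (fun x => x.1 = s ∧ q < x.2) : Nat) : Int) := by
        have := ih (d.insert a.1 (d.getD a.1 [] ++ [a.2])) s q
        rwa [PySem.Dict.getD_insert_of_ne _ _ _ (fun h => hs h.symm)] at this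
      rw [h1, h2]
      simp only [List.countP_cons, hs]
      push_cast
      simp
      ring

theorem pvCross_empty (l : List (Int × Int)) : pvCross PySem.Dict.empty l = pvCnt l := by
  induction l with
  | nil => rfl
  | cons a t ih =>
    simp only [pvCross, pvCnt, PySem.Dict.getD_empty]
    rw [show (PySem.Dict.empty : PySem.Dict Int (List Int)).insert a.1 ([] ++ [a.2])
          = PySem.Dict.empty.insert a.1 ((PySem.Dict.empty : PySem.Dict Int (List Int)).getD a.1 [] ++ [a.2]) by
        rw [PySem.Dict.getD_empty]]
    rw [pvCross_insert, ih]
    simp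
    ring

theorem pvB_loop (l : List (Int × Int)) :
    ∀ (d : PySem.Dict Int (List Int)) (J : Int),
    (l.foldl
      (fun (st : PySem.Dict Int (List Int) × Int) sq =>
        (st.1.insert sq.1 (st.1.getD sq.1 [] ++ [sq.2]),
         st.2 + (((st.1.getD sq.1 []).countP (fun x => x < sq.2) : Nat) : Int)))
      (d, J)).2 = J + pvCross d l := by
  induction l with
  | nil => intro d J; simp [pvCross]
  | cons a t ih =>
    intro d J
    simp only [List.foldl_cons, pvCross, ih]
    ring

theorem score_J_alt_eq (u p : List Int) (S : Int) : score_J_alt u p S = pvCnt (u.zip p) := by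
  unfold score_J_alt
  rw [pvB_loop, pvCross_empty]
  ring

-- ===== A side =====

theorem pv_foldl_ite_add {α : Type} (P : α → Prop) [DecidablePred P] (l : List α) (a : Int) :
    l.foldl (fun J x => if P x then J + 1 else J) a
      = a + ((l.countP (fun x => decide (P x)) : Nat) : Int) := by
  simpa using PySem.List.foldl_count_if (fun x => decide (P x)) l a

theorem pv_sum_range (n : Nat) (f : Nat → Int) :
    ((List.range n).map f).sum = ∑ i ∈ Finset.range n, f i := rfl

theorem pv_outer_fold (N : Int) (c : Int → Int → Prop) [∀ i j, Decidable (c i j)]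
    (L : List Int) (a : Int) :
    L.foldl (fun J i =>
        (PySem.List.pyRange (i + 1) N 1).foldl (fun J j => if c i j then J + 1 else J) J) a
      = a + (L.map (fun i =>
          (((PySem.List.pyRange (i + 1) N 1).countP (fun j => decide (c i j)) : Nat) : Int))).sum := by
  rw [show (fun (J i : Int) =>
        (PySem.List.pyRange (i + 1) N 1).foldl (fun J j => if c i j then J + 1 else J) J)
      = fun (J i : Int) => J + (((PySem.List.pyRange (i + 1) N 1).countP
          (fun j => decide (c i j)) : Nat) : Int) from
    funext fun J => funext fun i => pv_foldl_ite_add _ _ _]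
  exact PySem.List.foldl_add L _ a

theorem score_J_eq_sum (u p : List Int) (S : Int) :
    score_J u p S =
      ∑ i ∈ Finset.range (u.length - 1), ∑ j ∈ Finset.range (u.length - 1 - i),
        (if u.getD i 0 = u.getD (i + 1 + j) 0 ∧ p.getD i 0 < p.getD (i + 1 + j) 0
         then (1 : Int) else 0) := by
  unfold score_J
  rw [pv_outer_fold ((u.length : Int))
        (fun i j => PySem.List.pyGetD u i 0 = PySem.List.pyGetD u j 0 ∧
                    PySem.List.pyGetD p i 0 < PySem.List.pyGetD p j 0)]
  rw [PySem.List.pyRange_one 0 ((u.length : Int) - 1)]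
  have hn : (((u.length : Int) - 1) - 0).toNat = u.length - 1 := by omega
  rw [hn, List.map_map, zero_add, pv_sum_range]
  apply Finset.sum_congr rfl
  intro k hk
  simp only [Function.comp_apply, zero_add]
  rw [PySem.List.pyRange_one ((k : Int) + 1) (u.length : Int), List.countP_map]
  have hm : ((u.length : Int) - ((k : Int) + 1)).toNat = u.length - 1 - k := by omega
  rw [hm, ← PySem.List.sum_map_ite_one_zero, pv_sum_range]
  apply Finset.sum_congr rfl
  intro j hj
  have hcast : (k : Int) + 1 + (j : Int) = ((k + 1 + j : Nat) : Int) := by push_cast; ring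
  simp only [Function.comp_apply, hcast, PySem.List.pyGetD_natCast, decide_eq_true_eq]

theorem head_sum (a b : Int) (u p : List Int) (h : u.length ≤ p.length) :
    (∑ j ∈ Finset.range u.length,
      (if a = u.getD j 0 ∧ b < p.getD j 0 then (1 : Int) else 0))
      = (((u.zip p).countP (fun x => a = x.1 ∧ b < x.2) : Nat) : Int) := by
  induction u generalizing p with
  | nil => simp
  | cons c u' ih =>
    cases p with
    | nil => simp at h
    | cons d p' =>
      simp only [List.length_cons, List.zip_cons_cons, List.countP_cons]
      rw [Finset.sum_range_succ']
      simp only [List.getD_cons_succ, List.getD_cons_zero]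
      rw [ih p' (by simpa using h)]
      push_cast
      by_cases hcd : a = c ∧ b < d <;> simp [hcd]

theorem pv_shift (a b c : Int) (u'' p' : List Int) :
    (∑ i ∈ Finset.range (u''.length + 1), ∑ j ∈ Finset.range (u''.length + 1 - i),
        (if (a :: c :: u'').getD i 0 = (a :: c :: u'').getD (i + 1 + j) 0 ∧
            (b :: p').getD i 0 < (b :: p').getD (i + 1 + j) 0 then (1 : Int) else 0))
      = (∑ j ∈ Finset.range (u''.length + 1),
          (if a = (c :: u'').getD j 0 ∧ b < p'.getD j 0 then (1 : Int) else 0))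
        + ∑ i ∈ Finset.range u''.length, ∑ j ∈ Finset.range (u''.length - i),
            (if (c :: u'').getD i 0 = (c :: u'').getD (i + 1 + j) 0 ∧
                p'.getD i 0 < p'.getD (i + 1 + j) 0 then (1 : Int) else 0) := by
  rw [Finset.sum_range_succ']
  have h0 : (∑ j ∈ Finset.range (u''.length + 1 - 0),
        (if (a :: c :: u'').getD 0 0 = (a :: c :: u'').getD (0 + 1 + j) 0 ∧
            (b :: p').getD 0 0 < (b :: p').getD (0 + 1 + j) 0 then (1 : Int) else 0))
      = ∑ j ∈ Finset.range (u''.length + 1),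
          (if a = (c :: u'').getD j 0 ∧ b < p'.getD j 0 then (1 : Int) else 0) := by
    rw [Nat.sub_zero]
    apply Finset.sum_congr rfl
    intro j hj
    have e : 0 + 1 + j = j + 1 := by omega
    rw [e, List.getD_cons_succ, List.getD_cons_succ]
    rfl
  have hs : (∑ i ∈ Finset.range u''.length, ∑ j ∈ Finset.range (u''.length + 1 - (i + 1)),
        (if (a :: c :: u'').getD (i + 1) 0 = (a :: c :: u'').getD (i + 1 + 1 + j) 0 ∧
            (b :: p').getD (i + 1) 0 < (b :: p').getD (i + 1 + 1 + j) 0 then (1 : Int) else 0))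
      = ∑ i ∈ Finset.range u''.length, ∑ j ∈ Finset.range (u''.length - i),
          (if (c :: u'').getD i 0 = (c :: u'').getD (i + 1 + j) 0 ∧
              p'.getD i 0 < p'.getD (i + 1 + j) 0 then (1 : Int) else 0) := by
    apply Finset.sum_congr rfl
    intro i hi
    have hr : u''.length + 1 - (i + 1) = u''.length - i := by omega
    rw [hr]
    apply Finset.sum_congr rfl
    intro j hj
    have e : i + 1 + 1 + j = (i + 1 + j) + 1 := by omega
    rw [e, List.getD_cons_succ, List.getD_cons_succ, List.getD_cons_succ, List.getD_cons_succ]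
  rw [h0, hs, add_comm]

theorem score_J_eq_cnt (u p : List Int) (S : Int) (h : u.length ≤ p.length) :
    score_J u p S = pvCnt (u.zip p) := by
  induction u generalizing p with
  | nil => simp [score_J_eq_sum, pvCnt]
  | cons a u' ih =>
    cases p with
    | nil => simp at h
    | cons b p' =>
      have hlen : u'.length ≤ p'.length := by simpa using h
      cases u' with
      | nil => simp [score_J_eq_sum, pvCnt]
      | cons c u'' =>
        rw [score_J_eq_sum]
        simp only [List.length_cons, Nat.add_sub_cancel, List.zip_cons_cons, pvCnt]
        rw [← ih _ hlen, score_J_eq_sum (c :: u'') p' S]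
        simp only [List.length_cons, Nat.add_sub_cancel]
        rw [pv_shift]
        congr 1
        have hh := head_sum a b (c :: u'') p' hlen
        simp only [List.length_cons] at hh
        rw [hh]
        exact congrArg _ (List.countP_congr (fun x _ => by
          simp only [decide_eq_true_eq]
          exact ⟨fun h => ⟨h.1.symm, h.2⟩, fun h => ⟨h.1.symm, h.2⟩⟩))

theorem pv_zip_take (u p : List Int) : u.zip p = (u.take p.length).zip p := by
  induction u generalizing p with
  | nil => simp
  | cons a u ih =>
    cases p with
    | nil => simp
    | cons b p => simp [ih]

theorem pv_getD_take (l : List Int) (m i : Nat) (h : i < m) :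
    (l.take m).getD i 0 = l.getD i 0 := by
  simp [List.getD_eq_getElem?_getD, h]

theorem score_J_eq_cnt_short (u p : List Int) (S : Int) (hm : p.length < u.length)
    (H : ∀ j < u.length, p.length ≤ j → ∀ i < j, u.getD i 0 ≠ u.getD j 0) :
    score_J u p S = pvCnt (u.zip p) := by
  have htk : (u.take p.length).length = p.length := by simp; omega
  rw [pv_zip_take, ← score_J_eq_cnt (u.take p.length) p S (le_of_eq htk)]
  rw [score_J_eq_sum, score_J_eq_sum (u.take p.length) p S, htk]
  have hzero : ∀ i j : Nat, i < j → j < u.length → p.length ≤ j →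
      (if u.getD i 0 = u.getD j 0 ∧ p.getD i 0 < p.getD j 0 then (1 : Int) else 0) = 0 :=
    fun i j hij hj hpj => if_neg (fun hc => H j hj hpj i hij hc.1)
  have inner_eq : ∀ i, i < p.length - 1 →
      (∑ j ∈ Finset.range (u.length - 1 - i),
        (if u.getD i 0 = u.getD (i + 1 + j) 0 ∧ p.getD i 0 < p.getD (i + 1 + j) 0
         then (1 : Int) else 0))
      = ∑ j ∈ Finset.range (p.length - 1 - i),
          (if u.getD i 0 = u.getD (i + 1 + j) 0 ∧ p.getD i 0 < p.getD (i + 1 + j) 0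
           then (1 : Int) else 0) := by
    intro i hi
    refine (Finset.sum_subset
      (fun x hx => Finset.mem_range.mpr (by have := Finset.mem_range.mp hx; omega)) ?_).symm
    intro j hj hj'
    have hjr := Finset.mem_range.mp hj
    have hnotlt : ¬ j < p.length - 1 - i := fun hlt => hj' (Finset.mem_range.mpr hlt)
    exact hzero i (i + 1 + j) (by omega) (by omega) (by omega)
  have outer_eq : (∑ i ∈ Finset.range (u.length - 1),
        ∑ j ∈ Finset.range (u.length - 1 - i),
          (if u.getD i 0 = u.getD (i + 1 + j) 0 ∧ p.getD i 0 < p.getD (i + 1 + j) 0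
           then (1 : Int) else 0))
      = ∑ i ∈ Finset.range (p.length - 1),
          ∑ j ∈ Finset.range (u.length - 1 - i),
            (if u.getD i 0 = u.getD (i + 1 + j) 0 ∧ p.getD i 0 < p.getD (i + 1 + j) 0
             then (1 : Int) else 0) := by
    refine (Finset.sum_subset
      (fun x hx => Finset.mem_range.mpr (by have := Finset.mem_range.mp hx; omega)) ?_).symm
    intro i hi hi'
    have hir := Finset.mem_range.mp hi
    apply Finset.sum_eq_zero
    intro j hj
    have hjr := Finset.mem_range.mp hj
    have hile : ¬ i < p.length - 1 := fun hlt => hi' (Finset.mem_range.mpr hlt)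
    exact hzero i (i + 1 + j) (by omega) (by omega) (by omega)
  rw [outer_eq]
  apply Finset.sum_congr rfl
  intro i hi
  have hir := Finset.mem_range.mp hi
  rw [inner_eq i hir]
  apply Finset.sum_congr rfl
  intro j hj
  have hjr := Finset.mem_range.mp hj
  rw [pv_getD_take u p.length i (by omega), pv_getD_take u p.length (i + 1 + j) (by omega)]

-- ===== VERDICT (by name: the statement is the Claim_ definition above) =====
theorem score_J_spec : Claim_equal_score_J := by
  intro u p S _ hpre
  unfold Spec_score_J
  rw [score_J_alt_eq]
  rcases hpre with h | h
  · exact score_J_eq_cnt u p S h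
  · by_cases hle : u.length ≤ p.length
    · exact score_J_eq_cnt u p S hle
    · exact score_J_eq_cnt_short u p S (by omega) h
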